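-- pv_equiv track=rewrite | github.com/swp-berlin/ru_budget_tracker | src/scripts/parsers/report_parser.py | parse_program_code
-- ===== SOURCE A (Python) =====
-- from typing import List, Tuple, Optional, Dict
--
-- def parse_program_code(program_full: str) -> Optional[str]:
--     """
--     Parse program code by stripping trailing all-zero segments.
--
--     10-character structure: XX X XX XXXXX (2+1+2+5)
--     Segments: [0:2], [2:3], [3:5], [5:10]
--
--     Strip trailing segments that are ALL zeros from right to left.
--
--     Examples:
--         "0100000000" → "01" (strip "00000", "00", "0")
--         "0110000000" → "011" (strip "00000", "00", but "1" is not zeros)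
--         "0110400000" → "01104" (strip "00000", but "04" is not all zeros)
--         "0110490000" → "0110490000" (no stripping, "90000" is not all zeros)
--
--     Returns: Stripped program code, or None if invalid/empty
--     """
--     if not program_full:
--         return None
--
--     program_full = str(program_full).strip()
--
--     if len(program_full) != 10:
--         return program_full  # Return as-is if not 10 chars
--
--     # Split into segments: XX X XX XXXXX
--     segments = [
--         program_full[0:2],   # 2 chars
--         program_full[2:3],   # 1 char
--         program_full[3:5],   # 2 chars
--         program_full[5:10],  # 5 chars
--     ]
--
--     # Strip trailing all-zero segments from right to left
--     while segments and all(c == '0' for c in segments[-1]):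
--         segments.pop()
--
--     if not segments:
--         return None
--
--     return ''.join(segments)
-- ===== SOURCE B (Python) =====
-- def parse_program_code(program_full):
--     """Different algorithm: instead of segment-by-segment stripping, compute
--     the length of the code with trailing zero characters removed (one rstrip),
--     round that length UP to the next fixed segment boundary (2,3,5,10) and
--     return a single slice.  Correct because a trailing all-zero segment is
--     stripped by A exactly when every character after the last nonzero one is
--     zero, i.e. the kept prefix always ends at the boundary of the segment
--     containing the last nonzero character."""
--     if not program_full:
--         return None
--     s = str(program_full).strip()
--     if len(s) != 10:
--         return s
--     n = len(s.rstrip('0'))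
--     if n == 0:
--         return None
--     cutoff = 2 if n <= 2 else 3 if n == 3 else 5 if n <= 5 else 10
--     return s[:cutoff]
-- ===== Notes on version B (the rewrite author's own statement) =====
-- stated objective: alternative
-- what changed: Instead of splitting into segments and popping trailing all-zero segments, B removes trailing zero characters with one rstrip, rounds the remaining length up to the next fixed segment boundary (2,3,5,10), and returns a single slice.
import Mathlib
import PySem

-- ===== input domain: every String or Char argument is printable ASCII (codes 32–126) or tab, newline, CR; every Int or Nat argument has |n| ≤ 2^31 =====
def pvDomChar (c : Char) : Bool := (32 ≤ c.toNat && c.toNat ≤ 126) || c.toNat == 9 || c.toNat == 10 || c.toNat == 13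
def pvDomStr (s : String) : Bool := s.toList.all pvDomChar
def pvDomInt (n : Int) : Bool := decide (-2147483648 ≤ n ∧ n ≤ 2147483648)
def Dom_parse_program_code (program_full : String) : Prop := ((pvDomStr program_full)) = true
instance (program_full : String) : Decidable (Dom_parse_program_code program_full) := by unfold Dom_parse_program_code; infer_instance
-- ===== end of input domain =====

-- B replaces A's segment-list pop-and-join loop by one rstrip of trailing zero characters
-- plus rounding the remaining length up to a fixed segment boundary (alternative algorithm, same cost).

-- ===== PORT A =====
-- 'while segments and all(c == '0' for c in segments[-1]): segments.pop()', popping from the back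
def pvPopZeros : List String → List String
  | [] => []
  | s :: rest => if s.toList.all (· == '0') then pvPopZeros rest else s :: rest

def parse_program_code (program_full : String) : Option String :=
  if PySem.Str.len program_full = 0 then none
  else
    let pf := PySem.Str.strip program_full
    if PySem.Str.len pf ≠ 10 then some pf
    else
      let segments : List String :=
        [ PySem.Str.slice pf (some 0) (some 2)
        , PySem.Str.slice pf (some 2) (some 3)
        , PySem.Str.slice pf (some 3) (some 5)
        , PySem.Str.slice pf (some 5) (some 10) ]
      let segments := (pvPopZeros segments.reverse).reverse
      if segments = [] then none
      else some (PySem.Str.join "" segments)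

-- ===== PORT B =====
-- s.rstrip of zeros ported by hand (exact: drop trailing zero characters); only its LENGTH is used
def parse_program_code_alt (program_full : String) : Option String :=
  if PySem.Str.len program_full = 0 then none
  else
    let s := PySem.Str.strip program_full
    if PySem.Str.len s ≠ 10 then some s
    else
      let n : Nat := ((s.toList.reverse.dropWhile (· == '0')).reverse).length
      if n = 0 then none
      else
        let cutoff : Int := if n ≤ 2 then 2 else if n = 3 then 3 else if n ≤ 5 then 5 else 10
        some (PySem.Str.slice s none (some cutoff))

-- ===== PRECONDITION & SPEC =====
def Spec_parse_program_code (program_full : String) (out : Option String) : Prop := out = parse_program_code_alt program_full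
instance (program_full : String) (out : Option String) : Decidable (Spec_parse_program_code program_full out) := by unfold Spec_parse_program_code; infer_instance

-- ===== CLAIM (what is proved, stated in full; the proofs are below) =====
def Claim_equal_parse_program_code : Prop := ∀ (program_full : String), Dom_parse_program_code program_full → Spec_parse_program_code program_full (parse_program_code program_full)

-- ===== LEMMAS AND PROOFS =====

theorem pvList10 {α : Type} (l : List α) (hl : l.length = 10) :
    ∃ a b c d e f g h i j, l = [a, b, c, d, e, f, g, h, i, j] := by
  rcases l with _ | ⟨a, _ | ⟨b, _ | ⟨c, _ | ⟨d, _ | ⟨e, _ | ⟨f, _ | ⟨g, _ | ⟨h, _ | ⟨i, _ | ⟨j, _ | ⟨k, l⟩⟩⟩⟩⟩⟩⟩⟩⟩⟩⟩ <;>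
    simp_all

theorem parse_program_code_spec : Claim_equal_parse_program_code := by
  intro t _
  unfold Spec_parse_program_code parse_program_code parse_program_code_alt
  by_cases h0 : PySem.Str.len t = 0
  · rw [if_pos h0, if_pos h0]
  rw [if_neg h0, if_neg h0]
  by_cases h10 : PySem.Str.len (PySem.Str.strip t) ≠ 10
  · rw [if_pos h10, if_pos h10]
  rw [if_neg h10, if_neg h10]
  set pf := PySem.Str.strip t with hpf
  have hlen : pf.toList.length = 10 := by
    have := PySem.Str.len_eq pf
    omega
  obtain ⟨a, b, c, d, e, f, g, h, i, j, ht⟩ := pvList10 pf.toList hlen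
  have s02 : PySem.Str.slice pf (some 0) (some 2) = String.ofList [a, b] := by
    rw [← String.toList_inj, PySem.Str.toList_slice]; unfold PySem.Chars.slice
    rw [PySem.List.slice_toNat _ (by norm_num) (by norm_num), ht]; simp
  have s23 : PySem.Str.slice pf (some 2) (some 3) = String.ofList [c] := by
    rw [← String.toList_inj, PySem.Str.toList_slice]; unfold PySem.Chars.slice
    rw [PySem.List.slice_toNat _ (by norm_num) (by norm_num), ht]; simp
  have s35 : PySem.Str.slice pf (some 3) (some 5) = String.ofList [d, e] := by
    rw [← String.toList_inj, PySem.Str.toList_slice]; unfold PySem.Chars.slice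
    rw [PySem.List.slice_toNat _ (by norm_num) (by norm_num), ht]; simp
  have s510 : PySem.Str.slice pf (some 5) (some 10) = String.ofList [f, g, h, i, j] := by
    rw [← String.toList_inj, PySem.Str.toList_slice]; unfold PySem.Chars.slice
    rw [PySem.List.slice_toNat _ (by norm_num) (by norm_num), ht]; simp
  have w2 : PySem.Str.slice pf none (some 2) = String.ofList [a, b] := by
    rw [← String.toList_inj, PySem.Str.toList_slice]; unfold PySem.Chars.slice
    rw [PySem.List.slice_to _ (by norm_num), ht]; simp
  have w3 : PySem.Str.slice pf none (some 3) = String.ofList [a, b, c] := by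
    rw [← String.toList_inj, PySem.Str.toList_slice]; unfold PySem.Chars.slice
    rw [PySem.List.slice_to _ (by norm_num), ht]; simp
  have w5 : PySem.Str.slice pf none (some 5) = String.ofList [a, b, c, d, e] := by
    rw [← String.toList_inj, PySem.Str.toList_slice]; unfold PySem.Chars.slice
    rw [PySem.List.slice_to _ (by norm_num), ht]; simp
  have w10 : PySem.Str.slice pf none (some 10) = String.ofList [a, b, c, d, e, f, g, h, i, j] := by
    rw [← String.toList_inj, PySem.Str.toList_slice]; unfold PySem.Chars.slice
    rw [PySem.List.slice_to _ (by norm_num), ht]; simp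
  rw [s02, s23, s35, s510, ht]
  by_cases zj : j = '0' <;> [skip; · simp [pvPopZeros, zj, w10, List.intercalate, List.intersperse,
    ← String.toList_inj, PySem.Str.toList_join, PySem.Chars.join]]
  subst zj
  by_cases zi : i = '0' <;> [skip; · simp [pvPopZeros, zi, w10, List.intercalate, List.intersperse,
    ← String.toList_inj, PySem.Str.toList_join, PySem.Chars.join]]
  subst zi
  by_cases zh : h = '0' <;> [skip; · simp [pvPopZeros, zh, w10, List.intercalate, List.intersperse,
    ← String.toList_inj, PySem.Str.toList_join, PySem.Chars.join]]
  subst zh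
  by_cases zg : g = '0' <;> [skip; · simp [pvPopZeros, zg, w10, List.intercalate, List.intersperse,
    ← String.toList_inj, PySem.Str.toList_join, PySem.Chars.join]]
  subst zg
  by_cases zf : f = '0' <;> [skip; · simp [pvPopZeros, zf, w10, List.intercalate, List.intersperse,
    ← String.toList_inj, PySem.Str.toList_join, PySem.Chars.join]]
  subst zf
  by_cases ze : e = '0' <;> [skip; · simp [pvPopZeros, ze, w5, List.intercalate, List.intersperse,
    ← String.toList_inj, PySem.Str.toList_join, PySem.Chars.join]]
  subst ze
  by_cases zd : d = '0' <;> [skip; · simp [pvPopZeros, zd, w5, List.intercalate, List.intersperse,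
    ← String.toList_inj, PySem.Str.toList_join, PySem.Chars.join]]
  subst zd
  by_cases zc : c = '0' <;> [skip; · simp [pvPopZeros, zc, w3, List.intercalate, List.intersperse,
    ← String.toList_inj, PySem.Str.toList_join, PySem.Chars.join]]
  subst zc
  by_cases zb : b = '0' <;> [skip; · simp [pvPopZeros, zb, w2, List.intercalate,
    ← String.toList_inj, PySem.Str.toList_join, PySem.Chars.join]]
  subst zb
  by_cases za : a = '0' <;> [skip; · simp [pvPopZeros, za, w2, List.intercalate,
    ← String.toList_inj, PySem.Str.toList_join, PySem.Chars.join]]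
  subst za
  simp [pvPopZeros]
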